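-- pv_equiv track=rewrite | github.com/jardessonrb/UFPI-Atividades-Algebra-Linear | Atividade2-LaPlace/main.py | definir_melhor_escolha_linha_coluna
-- ===== SOURCE A (Python) =====
-- LINHA = "linha"
--
-- COLUNA = "coluna"
--
-- def definir_melhor_escolha_linha_coluna(matriz):
--     dicionario = {LINHA : (0, 0), COLUNA : (0, 0)}
--     for linha in range(0, len(matriz)):
--         valor_linha = 0
--         for coluna in range(0, len(matriz)):
--             if matriz[linha][coluna] == 0:
--                valor_linha += 1
--         if dicionario[LINHA][1] < valor_linha:
--             dicionario[LINHA] = (linha, valor_linha)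
--     for coluna in range(0, len(matriz)):
--         valor_coluna = 0
--         for linha in range(0, len(matriz)):
--             if matriz[linha][coluna] == 0:
--                 valor_coluna += 1
--         if dicionario[COLUNA][1] < valor_coluna:
--             dicionario[COLUNA] = (coluna, valor_coluna)
--
--     if dicionario[LINHA][1] >= dicionario[COLUNA][1]:
--         return (LINHA, dicionario[LINHA][0])
--     else:
--         return (COLUNA, dicionario[COLUNA][0])
-- ===== SOURCE B (Python) =====
-- LINHA = "linha"
--
-- COLUNA = "coluna"
--
-- def definir_melhor_escolha_linha_coluna(matriz):
--     n = len(matriz)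
--     if n == 0:
--         return (LINHA, 0)
--     row_zeros = [0] * n
--     col_zeros = [0] * n
--     for i in range(n):
--         for j in range(n):
--             if matriz[i][j] == 0:
--                 row_zeros[i] += 1
--                 col_zeros[j] += 1
--     bi = max(range(n), key=row_zeros.__getitem__)
--     bj = max(range(n), key=col_zeros.__getitem__)
--     if row_zeros[bi] >= col_zeros[bj]:
--         return (LINHA, bi)
--     return (COLUNA, bj)
-- ===== Notes on version B (the rewrite author's own statement) =====
-- stated objective: faster
-- what changed: Replaces A's two separate O(n^2) passes (each recounting zeros and maintaining a running best (index,count) pair) with a single fused pass over all cells that accumulates per-row and per-column zero-count arrays simultaneously, followed by max(range(n), key=...) argmax selection; Pre_ excludes matrices having a row shorter than len(matriz), on which A raises IndexError.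
import Mathlib
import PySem

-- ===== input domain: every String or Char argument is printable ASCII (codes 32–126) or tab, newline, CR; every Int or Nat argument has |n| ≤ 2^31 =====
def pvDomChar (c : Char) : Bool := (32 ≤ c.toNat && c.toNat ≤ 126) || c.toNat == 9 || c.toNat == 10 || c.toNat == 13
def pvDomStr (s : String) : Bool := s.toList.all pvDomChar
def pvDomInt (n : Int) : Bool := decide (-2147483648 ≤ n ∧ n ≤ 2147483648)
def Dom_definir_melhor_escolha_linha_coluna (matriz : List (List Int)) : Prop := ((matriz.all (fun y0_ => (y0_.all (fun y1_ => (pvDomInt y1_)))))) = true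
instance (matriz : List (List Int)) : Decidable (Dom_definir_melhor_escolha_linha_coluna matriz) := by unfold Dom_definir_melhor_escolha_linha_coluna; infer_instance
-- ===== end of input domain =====

-- B replaces A's two separate passes (each with a running-best pair) by ONE fused pass
-- accumulating per-row and per-column zero-count arrays, then argmax via max(range(n), key=...).

-- ===== PORT A =====
-- pyGetD defaults ([] for a missing row, 1 for a missing entry) are never used under Pre_,
-- which excludes exactly the inputs where Python's indexing raises IndexError.
def definir_melhor_escolha_linha_coluna (matriz : List (List Int)) : String × Int :=
  let n : Int := matriz.length
  let bestRow : Int × Int :=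
    (PySem.List.pyRange 0 n).foldl (fun best linha =>
      let valor_linha : Int :=
        (PySem.List.pyRange 0 n).foldl (fun acc coluna =>
          if PySem.List.pyGetD (PySem.List.pyGetD matriz linha []) coluna 1 == 0 then acc + 1 else acc) 0
      if best.2 < valor_linha then (linha, valor_linha) else best) (0, 0)
  let bestCol : Int × Int :=
    (PySem.List.pyRange 0 n).foldl (fun best coluna =>
      let valor_coluna : Int :=
        (PySem.List.pyRange 0 n).foldl (fun acc linha =>
          if PySem.List.pyGetD (PySem.List.pyGetD matriz linha []) coluna 1 == 0 then acc + 1 else acc) 0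
      if best.2 < valor_coluna then (coluna, valor_coluna) else best) (0, 0)
  if bestRow.2 ≥ bestCol.2 then ("linha", bestRow.1) else ("coluna", bestCol.1)

-- ===== PORT B =====
-- One fused pass over all (i, j): both count arrays are bumped in the same inner loop
-- (row_zeros[i] += 1 / col_zeros[j] += 1 is pySetD at a nonnegative in-range index).
def definir_melhor_escolha_linha_coluna_alt (matriz : List (List Int)) : String × Int :=
  let n : Int := matriz.length
  if n == 0 then ("linha", 0) else
  let p : List Int × List Int :=
    (PySem.List.pyRange 0 n).foldl (fun p i =>
      (PySem.List.pyRange 0 n).foldl (fun q j =>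
        if PySem.List.pyGetD (PySem.List.pyGetD matriz i []) j 1 == 0 then
          (PySem.List.pySetD q.1 i (PySem.List.pyGetD q.1 i 0 + 1),
           PySem.List.pySetD q.2 j (PySem.List.pyGetD q.2 j 0 + 1))
        else q) p)
      (List.replicate matriz.length (0 : Int), List.replicate matriz.length (0 : Int))
  let bi : Int := (PySem.List.max? (PySem.List.pyRange 0 n) (fun i => PySem.List.pyGetD p.1 i 0)).getD 0
  let bj : Int := (PySem.List.max? (PySem.List.pyRange 0 n) (fun j => PySem.List.pyGetD p.2 j 0)).getD 0
  if PySem.List.pyGetD p.1 bi 0 ≥ PySem.List.pyGetD p.2 bj 0 then ("linha", bi) else ("coluna", bj)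

-- ===== PRECONDITION & SPEC =====
-- Pre_ excludes exactly the matrices with a row shorter than len(matriz): there A (and B) raise IndexError.
def Pre_definir_melhor_escolha_linha_coluna (matriz : List (List Int)) : Prop :=
  ∀ row ∈ matriz, matriz.length ≤ row.length
instance (matriz : List (List Int)) : Decidable (Pre_definir_melhor_escolha_linha_coluna matriz) := by
  unfold Pre_definir_melhor_escolha_linha_coluna; infer_instance
def pvWitness_definir_melhor_escolha_linha_coluna : List (List Int) := [[0, 1], [1, 1]]
def Spec_definir_melhor_escolha_linha_coluna (matriz : List (List Int)) (out : String × Int) : Prop := out = definir_melhor_escolha_linha_coluna_alt matriz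
instance (matriz : List (List Int)) (out : String × Int) : Decidable (Spec_definir_melhor_escolha_linha_coluna matriz out) := by unfold Spec_definir_melhor_escolha_linha_coluna; infer_instance

-- ===== CLAIM (what is proved, stated in full; the proofs are below) =====
def Claim_equal_definir_melhor_escolha_linha_coluna : Prop := ∀ (matriz : List (List Int)), Dom_definir_melhor_escolha_linha_coluna matriz → Pre_definir_melhor_escolha_linha_coluna matriz → Spec_definir_melhor_escolha_linha_coluna matriz (definir_melhor_escolha_linha_coluna matriz)

-- ===== LEMMAS AND PROOFS =====

-- A's running-best fold, started at (x, f x), lands on the first-argmax fold.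
theorem foldl_best (f : Int → Int) (t : List Int) (x : Int) :
    t.foldl (fun b i => if b.2 < f i then (i, f i) else b) (x, f x)
      = (t.foldl (fun m i => if f m < f i then i else m) x,
         f (t.foldl (fun m i => if f m < f i then i else m) x)) := by
  induction t generalizing x with
  | nil => rfl
  | cons y t ih =>
    simp only [List.foldl_cons]
    by_cases h : f x < f y
    · simp [h, ih]
    · simp [h, ih]

theorem max?_cons_foldl {α : Type} (key : α → Int) (x : α) (t : List α) :
    PySem.List.max? (x :: t) key
      = some (t.foldl (fun m i => if key m < key i then i else m) x) := by
  simp only [PySem.List.max?, List.foldl_cons]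
  induction t generalizing x with
  | nil => rfl
  | cons y t ih =>
    simp only [List.foldl_cons]
    by_cases h : key x < key y <;> simp [h, ih]

theorem init_step (k0 : Int) (h : 0 ≤ k0) :
    (if (0:Int) < k0 then ((0:Int), k0) else ((0:Int), (0:Int))) = (0, k0) := by
  split_ifs with hc
  · rfl
  · have : k0 = 0 := le_antisymm (not_lt.1 hc) h
    simp [this]

-- A's running-best loop computes the first argmax of its key and that key's value.
theorem A_fold_char (K V : Int → Int) (N : Int) (hN : 0 < N)
    (hkey : ∀ i ∈ PySem.List.pyRange 0 N, V i = K i) (h0 : 0 ≤ K 0) :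
    (PySem.List.pyRange 0 N).foldl (fun best i => if best.2 < V i then (i, V i) else best) ((0:Int),(0:Int))
      = ((PySem.List.max? (PySem.List.pyRange 0 N) K).getD 0,
         K ((PySem.List.max? (PySem.List.pyRange 0 N) K).getD 0)) := by
  have hc : (PySem.List.pyRange 0 N).foldl (fun best i => if best.2 < V i then (i, V i) else best) ((0:Int),(0:Int))
      = (PySem.List.pyRange 0 N).foldl (fun best i => if best.2 < K i then (i, K i) else best) ((0:Int),(0:Int)) := by
    refine PySem.List.foldl_congr_mem _ _ _ _ ?_
    intro acc i hi; rw [hkey i hi]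
  rw [hc, PySem.List.pyRange_one_cons hN, max?_cons_foldl]
  simp only [List.foldl_cons, Option.getD_some]
  rw [init_step (K 0) h0]
  exact foldl_best K _ 0

-- Reading an untouched index through set.
theorem pyGetD_set_self (r : List Int) (i v : Int) (hi : 0 ≤ i) (h : i < (r.length : Int)) :
    PySem.List.pyGetD (r.set i.toNat v) i 0 = v := by
  rw [PySem.List.pyGetD_eq_getElem _ _ hi (by simpa using h)]
  simp

theorem pyGetD_set_ne (r : List Int) (i k v : Int) (hi : 0 ≤ i) (hk : 0 ≤ k) (hne : i ≠ k) :
    PySem.List.pyGetD (r.set i.toNat v) k 0 = PySem.List.pyGetD r k 0 := by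
  by_cases h : k < (r.length : Int)
  · rw [PySem.List.pyGetD_eq_getElem _ _ hk (by simpa using h),
        PySem.List.pyGetD_eq_getElem _ _ hk h]
    exact List.getElem_set_ne (by omega) _
  · rw [PySem.List.pyGetD_of_nonneg _ _ hk, PySem.List.pyGetD_of_nonneg _ _ hk]
    have h1 : r.length ≤ k.toNat := by omega
    rw [List.getD_eq_getElem?_getD, List.getD_eq_getElem?_getD]
    rw [List.getElem?_eq_none (by simpa using h1), List.getElem?_eq_none h1]

-- The fused inner loop preserves the lengths of both accumulator lists.
theorem rowInner_length (c : Int → Bool) (i : Int) (l : List Int) (r : List Int) :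
    (l.foldl (fun r j => if c j then PySem.List.pySetD r i (PySem.List.pyGetD r i 0 + 1) else r) r).length
      = r.length := by
  induction l generalizing r with
  | nil => rfl
  | cons j l ih =>
    simp only [List.foldl_cons]
    split
    · rw [ih, PySem.List.length_pySetD]
    · exact ih r

theorem colInner_length (c : Int → Bool) (l : List Int) (r : List Int) :
    (l.foldl (fun r j => if c j then PySem.List.pySetD r j (PySem.List.pyGetD r j 0 + 1) else r) r).length
      = r.length := by
  induction l generalizing r with
  | nil => rfl
  | cons j l ih =>
    simp only [List.foldl_cons]
    split
    · rw [ih, PySem.List.length_pySetD]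
    · exact ih r

-- Row inner loop: indices other than i are untouched.
theorem rowInner_get_ne (c : Int → Bool) (i k : Int) (hi : 0 ≤ i) (hk : 0 ≤ k) (hne : i ≠ k)
    (l : List Int) (r : List Int) :
    PySem.List.pyGetD
      (l.foldl (fun r j => if c j then PySem.List.pySetD r i (PySem.List.pyGetD r i 0 + 1) else r) r) k 0
      = PySem.List.pyGetD r k 0 := by
  induction l generalizing r with
  | nil => rfl
  | cons j l ih =>
    simp only [List.foldl_cons]
    split
    · rw [ih, PySem.List.pySetD_of_nonneg _ _ hi, pyGetD_set_ne _ _ _ _ hi hk hne]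
    · exact ih r

-- Row inner loop: index i accumulates the number of passing j's.
theorem rowInner_get_self (c : Int → Bool) (i : Int) (hi : 0 ≤ i) (l : List Int) (r : List Int)
    (h : i < (r.length : Int)) :
    PySem.List.pyGetD
      (l.foldl (fun r j => if c j then PySem.List.pySetD r i (PySem.List.pyGetD r i 0 + 1) else r) r) i 0
      = PySem.List.pyGetD r i 0 + ((l.countP c : Nat) : Int) := by
  induction l generalizing r with
  | nil => simp
  | cons j l ih =>
    simp only [List.foldl_cons, List.countP_cons]
    by_cases hc : c j
    · rw [if_pos hc,
          ih _ (by rw [PySem.List.length_pySetD]; exact h),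
          PySem.List.pySetD_of_nonneg _ _ hi, pyGetD_set_self _ _ _ hi h]
      rw [if_pos hc]
      push_cast
      ring
    · rw [if_neg hc, ih _ h]
      simp [hc]

-- countP of "j == k and P j" collapses to a guarded count of k.
theorem countP_beq_and (l : List Int) (k : Int) (c : Int → Bool) :
    l.countP (fun j => j == k && c j) = if c k then l.count k else 0 := by
  induction l with
  | nil => simp
  | cons j l ih =>
    by_cases hjk : j = k
    · subst hjk
      by_cases hc : c j <;> simp [List.countP_cons, List.count_cons, ih, hc]
    · simp [List.countP_cons, ih, hjk, beq_iff_eq]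

-- Column inner loop: index k accumulates the passing j's equal to k.
theorem colInner_get (c : Int → Bool) (k : Int) (hk : 0 ≤ k) (l : List Int)
    (hpos : ∀ x ∈ l, 0 ≤ x) (r : List Int) (h : k < (r.length : Int)) :
    PySem.List.pyGetD
      (l.foldl (fun r j => if c j then PySem.List.pySetD r j (PySem.List.pyGetD r j 0 + 1) else r) r) k 0
      = PySem.List.pyGetD r k 0 + ((l.countP (fun j => j == k && c j) : Nat) : Int) := by
  induction l generalizing r with
  | nil => simp
  | cons j l ih =>
    have hj : 0 ≤ j := hpos j (by simp)
    have hpos' : ∀ x ∈ l, 0 ≤ x := fun x hx => hpos x (by simp [hx])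
    simp only [List.foldl_cons, List.countP_cons]
    by_cases hc : c j
    · by_cases hjk : j = k
      · subst hjk
        rw [if_pos hc,
            ih hpos' _ (by rw [PySem.List.length_pySetD]; exact h),
            PySem.List.pySetD_of_nonneg _ _ hj, pyGetD_set_self _ _ _ hk h]
        simp only [BEq.rfl, hc, Bool.and_self]
        push_cast
        ring
      · rw [if_pos hc,
            ih hpos' _ (by rw [PySem.List.length_pySetD]; exact h),
            PySem.List.pySetD_of_nonneg _ _ hj, pyGetD_set_ne _ _ _ _ hj hk hjk]
        simp [hjk]
    · rw [if_neg hc, ih hpos' _ h]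
      simp [hc]

-- Fused outer loop, row component: entry k ends at the count of passing columns of row k.
theorem rowOuter_get (c2 : Int → Int → Bool) (rng : List Int) (k : Int) (hk0 : 0 ≤ k)
    (L : List Int) (hLpos : ∀ x ∈ L, 0 ≤ x) (hnd : L.Nodup) (r : List Int)
    (hklen : k < (r.length : Int)) :
    PySem.List.pyGetD
      (L.foldl (fun r i =>
        rng.foldl (fun r j => if c2 i j then PySem.List.pySetD r i (PySem.List.pyGetD r i 0 + 1) else r) r) r) k 0
      = PySem.List.pyGetD r k 0 + (if k ∈ L then ((rng.countP (c2 k) : Nat) : Int) else 0) := by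
  induction L generalizing r with
  | nil => simp
  | cons i L ih =>
    have hi : 0 ≤ i := hLpos i (by simp)
    have hLpos' : ∀ x ∈ L, 0 ≤ x := fun x hx => hLpos x (by simp [hx])
    rcases List.nodup_cons.1 hnd with ⟨hnotin, hnd'⟩
    simp only [List.foldl_cons]
    by_cases hik : i = k
    · subst hik
      rw [ih hLpos' hnd' _ (by rw [rowInner_length]; exact hklen)]
      rw [rowInner_get_self (c2 i) i hi rng r hklen]
      simp [hnotin]
    · rw [ih hLpos' hnd' _ (by rw [rowInner_length]; exact hklen)]
      rw [rowInner_get_ne (c2 i) i k hi hk0 hik rng r]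
      by_cases hkL : k ∈ L
      · simp [hkL]
      · simp [hkL, Ne.symm hik]

-- Fused outer loop, column component: entry k ends at (count of k in rng) × (passing rows at column k).
theorem colOuter_get (c2 : Int → Int → Bool) (rng : List Int) (hrngpos : ∀ x ∈ rng, 0 ≤ x)
    (k : Int) (hk0 : 0 ≤ k) (L : List Int) (r : List Int) (hklen : k < (r.length : Int)) :
    PySem.List.pyGetD
      (L.foldl (fun r i =>
        rng.foldl (fun r j => if c2 i j then PySem.List.pySetD r j (PySem.List.pyGetD r j 0 + 1) else r) r) r) k 0
      = PySem.List.pyGetD r k 0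
        + ((rng.count k : Nat) : Int) * ((L.countP (fun i => c2 i k) : Nat) : Int) := by
  induction L generalizing r with
  | nil => simp
  | cons i L ih =>
    simp only [List.foldl_cons, List.countP_cons]
    rw [ih _ (by rw [colInner_length]; exact hklen)]
    rw [colInner_get (c2 i) k hk0 rng hrngpos r hklen, countP_beq_and]
    by_cases hc : c2 i k
    · simp only [hc, if_true]
      push_cast
      ring
    · simp only [hc]
      push_cast
      ring

-- The all-zero initial accumulator reads 0 everywhere.
theorem pyGetD_replicate_zero (n : Nat) (k : Int) (hk : 0 ≤ k) :
    PySem.List.pyGetD (List.replicate n (0 : Int)) k 0 = 0 := by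
  rw [PySem.List.pyGetD_of_nonneg _ _ hk, List.getD_eq_getElem?_getD]
  by_cases h : k.toNat < n
  · simp [h]
  · rw [List.getElem?_eq_none (by simpa using h)]
    rfl

-- ===== VERDICT (by name: the statement is the Claim_ definition above) =====
theorem definir_melhor_escolha_linha_coluna_spec :
    Claim_equal_definir_melhor_escolha_linha_coluna := by
  intro matriz _ _
  unfold Spec_definir_melhor_escolha_linha_coluna
  by_cases hM : matriz = []
  · subst hM; decide
  · have hn : 0 < matriz.length := List.length_pos_iff.mpr hM
    have hN0 : (0:Int) < (matriz.length : Int) := by exact_mod_cast hn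
    simp only [definir_melhor_escolha_linha_coluna, definir_melhor_escolha_linha_coluna_alt]
    set N : Int := (matriz.length : Int) with hNdef
    have hif : ((N == 0) = true) = False := by simp; omega
    simp only [hif, if_false]
    set cnd : Int → Int → Bool :=
      fun i j => PySem.List.pyGetD (PySem.List.pyGetD matriz i []) j 1 == 0 with hcnd
    set rng : List Int := PySem.List.pyRange 0 N with hrng
    have hrngpos : ∀ x ∈ rng, 0 ≤ x := by
      intro x hx; exact (PySem.List.mem_pyRange_one.1 hx).1
    set init : List Int := List.replicate matriz.length (0 : Int) with hinit
    -- split the fused pair fold into its two components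
    have h1 : ∀ (i : Int) (p : List Int × List Int),
        rng.foldl (fun q j =>
          if cnd i j then
            (PySem.List.pySetD q.1 i (PySem.List.pyGetD q.1 i 0 + 1),
             PySem.List.pySetD q.2 j (PySem.List.pyGetD q.2 j 0 + 1))
          else q) p
        = (rng.foldl (fun r j => if cnd i j then PySem.List.pySetD r i (PySem.List.pyGetD r i 0 + 1) else r) p.1,
           rng.foldl (fun r j => if cnd i j then PySem.List.pySetD r j (PySem.List.pyGetD r j 0 + 1) else r) p.2) := by
      intro i p
      obtain ⟨a, b⟩ := p
      have hstep : (fun (q : List Int × List Int) j =>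
          if cnd i j then
            (PySem.List.pySetD q.1 i (PySem.List.pyGetD q.1 i 0 + 1),
             PySem.List.pySetD q.2 j (PySem.List.pyGetD q.2 j 0 + 1))
          else q)
          = fun q j =>
            ((fun r j => if cnd i j then PySem.List.pySetD r i (PySem.List.pyGetD r i 0 + 1) else r) q.1 j,
             (fun r j => if cnd i j then PySem.List.pySetD r j (PySem.List.pyGetD r j 0 + 1) else r) q.2 j) := by
        funext q j
        by_cases h : cnd i j <;> simp [h]
      rw [hstep]
      exact PySem.List.foldl_prod_mk
        (f := fun r j => if cnd i j then PySem.List.pySetD r i (PySem.List.pyGetD r i 0 + 1) else r)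
        (g := fun r j => if cnd i j then PySem.List.pySetD r j (PySem.List.pyGetD r j 0 + 1) else r)
        rng a b
    have hsplit :
        rng.foldl (fun p i =>
          rng.foldl (fun q j =>
            if cnd i j then
              (PySem.List.pySetD q.1 i (PySem.List.pyGetD q.1 i 0 + 1),
               PySem.List.pySetD q.2 j (PySem.List.pyGetD q.2 j 0 + 1))
            else q) p) (init, init)
        = (rng.foldl (fun r i =>
             rng.foldl (fun r j => if cnd i j then PySem.List.pySetD r i (PySem.List.pyGetD r i 0 + 1) else r) r) init,
           rng.foldl (fun r i =>
             rng.foldl (fun r j => if cnd i j then PySem.List.pySetD r j (PySem.List.pyGetD r j 0 + 1) else r) r) init) := by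
      have hstep2 : (fun (p : List Int × List Int) i =>
          rng.foldl (fun q j =>
            if cnd i j then
              (PySem.List.pySetD q.1 i (PySem.List.pyGetD q.1 i 0 + 1),
               PySem.List.pySetD q.2 j (PySem.List.pyGetD q.2 j 0 + 1))
            else q) p)
          = fun p i =>
            ((fun r i =>
               rng.foldl (fun r j => if cnd i j then PySem.List.pySetD r i (PySem.List.pyGetD r i 0 + 1) else r) r) p.1 i,
             (fun r i =>
               rng.foldl (fun r j => if cnd i j then PySem.List.pySetD r j (PySem.List.pyGetD r j 0 + 1) else r) r) p.2 i) := by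
        funext p i
        exact h1 i p
      rw [hstep2]
      exact PySem.List.foldl_prod_mk
        (f := fun r i => rng.foldl (fun r j => if cnd i j then PySem.List.pySetD r i (PySem.List.pyGetD r i 0 + 1) else r) r)
        (g := fun r i => rng.foldl (fun r j => if cnd i j then PySem.List.pySetD r j (PySem.List.pyGetD r j 0 + 1) else r) r)
        rng init init
    rw [hsplit]
    set R : List Int := rng.foldl (fun r i =>
      rng.foldl (fun r j => if cnd i j then PySem.List.pySetD r i (PySem.List.pyGetD r i 0 + 1) else r) r) init with hR
    set C : List Int := rng.foldl (fun r i =>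
      rng.foldl (fun r j => if cnd i j then PySem.List.pySetD r j (PySem.List.pyGetD r j 0 + 1) else r) r) init with hC
    have hinitlen : (init.length : Int) = N := by simp [hinit, hNdef]
    -- the row array holds the row zero-counts
    have hRget : ∀ i ∈ rng, PySem.List.pyGetD R i 0 = ((rng.countP (cnd i) : Nat) : Int) := by
      intro i hi
      rcases PySem.List.mem_pyRange_one.1 hi with ⟨hi0, hiN⟩
      rw [hR, rowOuter_get cnd rng i hi0 rng hrngpos (by rw [hrng]; exact PySem.List.nodup_pyRange_one 0 N)
            init (by rw [hinitlen]; exact hiN)]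
      rw [pyGetD_replicate_zero _ _ hi0, if_pos hi, zero_add]
    -- the column array holds the column zero-counts
    have hCget : ∀ j ∈ rng, PySem.List.pyGetD C j 0 = ((rng.countP (fun i => cnd i j) : Nat) : Int) := by
      intro j hj
      rcases PySem.List.mem_pyRange_one.1 hj with ⟨hj0, hjN⟩
      rw [hC, colOuter_get cnd rng hrngpos j hj0 rng init (by rw [hinitlen]; exact hjN)]
      rw [pyGetD_replicate_zero _ _ hj0]
      have hcount1 : rng.count j = 1 :=
        List.count_eq_one_of_mem (by rw [hrng]; exact PySem.List.nodup_pyRange_one 0 N) hj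
      rw [hcount1]
      push_cast
      ring
    -- A's inner loops compute the same counts
    have hkeyr : ∀ i ∈ rng,
        rng.foldl (fun acc j => if cnd i j then acc + 1 else acc) (0:Int)
          = PySem.List.pyGetD R i 0 := by
      intro i hi
      rw [PySem.List.foldl_if_add_one, hRget i hi]
      ring
    have hkeyc : ∀ j ∈ rng,
        rng.foldl (fun acc i => if cnd i j then acc + 1 else acc) (0:Int)
          = PySem.List.pyGetD C j 0 := by
      intro j hj
      rw [PySem.List.foldl_if_add_one (fun i => cnd i j), hCget j hj]
      ring
    have h0mem : (0:Int) ∈ rng := by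
      rw [hrng]; exact PySem.List.mem_pyRange_one.2 ⟨le_refl 0, hN0⟩
    have h0r : 0 ≤ PySem.List.pyGetD R 0 0 := by
      rw [hRget 0 h0mem]; exact Int.natCast_nonneg _
    have h0c : 0 ≤ PySem.List.pyGetD C 0 0 := by
      rw [hCget 0 h0mem]; exact Int.natCast_nonneg _
    rw [hrng] at hkeyr hkeyc ⊢
    rw [A_fold_char (fun i => PySem.List.pyGetD R i 0) _ N hN0 hkeyr h0r,
        A_fold_char (fun j => PySem.List.pyGetD C j 0) _ N hN0 hkeyc h0c]
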